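-- pv_equiv track=rewrite | github.com/TLaborde/aoc2025 | 2025_06.py | part1
-- ===== SOURCE A (Python) =====
-- def part1(data):
--     """Solve part 1."""
--     data = [line.split() for line in data.split('\n')]
--     total = 0
--     # transpose data to get operations
--     data = list(map(list, zip(*data)))
--     for i in range(len(data)):
--         op = data[i][-1]
--         if op == '+':
--             total += sum(int(x) for x in data[i][:-1])
--         elif op == '*':
--             prod = 1
--             for x in data[i][:-1]:
--                 prod *= int(x)
--             total += prod
--
--     return total
-- ===== SOURCE B (Python) =====
-- def part1(data):
--     """Solve part 1."""
--     rows = [line.split() for line in data.split('\n')]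
--     *value_rows, ops = rows
--     sums = {j: 0 for j, op in enumerate(ops) if op == '+'}
--     prods = {j: 1 for j, op in enumerate(ops) if op == '*'}
--     for row in value_rows:
--         for j in sums:
--             sums[j] += int(row[j])
--         for j in prods:
--             prods[j] *= int(row[j])
--     return sum(sums.values()) + sum(prods.values())
-- ===== Notes on version B (the rewrite author's own statement) =====
-- stated objective: alternative
-- what changed: A transposes the table and reduces each column under its operator; B never transposes: it builds two dicts of column accumulators from the operator row (0 for '+' columns, 1 for '*' columns) and makes one row-major pass over the value rows updating them, then sums all accumulators. Pre_ excludes inputs where int() raises in an operator column, and ragged inputs where a value row lacks an operator-column entry: there A's zip(*) truncation silently drops columns while B, which indexes rows by the operator row, raises.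
-- outside the precondition, e.g. on part1('1 2\n3\n+ +'): A returns 4, B raises IndexError; on part1('1 x\n2\n+ +'): A returns 3, B raises ValueError
import Mathlib
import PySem

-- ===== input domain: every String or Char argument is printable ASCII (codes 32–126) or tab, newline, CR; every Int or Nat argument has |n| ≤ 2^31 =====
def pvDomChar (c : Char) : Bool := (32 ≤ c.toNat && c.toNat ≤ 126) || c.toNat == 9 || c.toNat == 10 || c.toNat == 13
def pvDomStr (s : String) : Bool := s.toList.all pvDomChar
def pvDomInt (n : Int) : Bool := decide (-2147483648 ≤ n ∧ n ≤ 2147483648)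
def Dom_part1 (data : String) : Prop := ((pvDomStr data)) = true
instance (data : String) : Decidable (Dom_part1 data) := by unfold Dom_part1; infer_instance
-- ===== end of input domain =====

-- B replaces A's transpose-then-column-reduction by one row-major pass over the value rows
-- updating per-column accumulator dicts built from the operator row; same value, different decomposition.

-- shared parsing step (both Pythons start with [line.split() for line in data.split('\n')])
def pvRows (data : String) : List (List String) :=
  ((PySem.Str.split? data "\n").getD []).map PySem.Str.split₀

-- int(x); total form — Pre_part1 excludes the inputs where Python's int() raises
def pvInt (x : String) : Int := (PySem.Int.ofStr? x).getD 0

-- ===== PORT A =====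
-- list(map(list, zip(*rows))): columns truncated to the shortest row
def pvZipStar (rows : List (List String)) : List (List String) :=
  (List.range (((rows.map List.length).min?).getD 0)).map
    (fun j => rows.map (fun r => r.getD j ""))

-- A's loop body: op = col[-1]; '+' adds the sum, '*' the hand-rolled product, of col[:-1]
def pvColStep (total : Int) (col : List String) : Int :=
  let op := PySem.List.pyGetD col (-1) ""
  if op = "+" then
    total + ((PySem.List.slice col none (some (-1))).map pvInt).sum
  else if op = "*" then
    total + (PySem.List.slice col none (some (-1))).foldl (fun prod x => prod * pvInt x) 1
  else total

def part1 (data : String) : Int :=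
  let rows := pvRows data
  let cols := pvZipStar rows
  (PySem.List.pyRange 0 (cols.length : Int) 1).foldl
    (fun total i => pvColStep total (PySem.List.pyGetD cols i [])) 0

-- ===== PORT B =====
-- sums = {j: 0 for j, op in enumerate(ops) if op == '+'}
def pvSums0 (ops : List String) : PySem.Dict Int Int :=
  ((PySem.List.enumerate ops).filter (fun p => p.2 == "+")).foldl
    (fun d p => d.insert p.1 0) PySem.Dict.empty

-- prods = {j: 1 for j, op in enumerate(ops) if op == '*'}
def pvProds0 (ops : List String) : PySem.Dict Int Int :=
  ((PySem.List.enumerate ops).filter (fun p => p.2 == "*")).foldl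
    (fun d p => d.insert p.1 1) PySem.Dict.empty

-- for j in sums: sums[j] += int(row[j])
def pvRowAdd (row : List String) (d : PySem.Dict Int Int) : PySem.Dict Int Int :=
  d.keys.foldl (fun d j => d.modify j 0 (fun a => a + pvInt (PySem.List.pyGetD row j ""))) d

-- for j in prods: prods[j] *= int(row[j])
def pvRowMul (row : List String) (d : PySem.Dict Int Int) : PySem.Dict Int Int :=
  d.keys.foldl (fun d j => d.modify j 1 (fun a => a * pvInt (PySem.List.pyGetD row j ""))) d

def part1_alt (data : String) : Int :=
  let rows := pvRows data
  let ops := rows.getLast?.getD []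
  let fin := rows.dropLast.foldl
    (fun (p : PySem.Dict Int Int × PySem.Dict Int Int) row => (pvRowAdd row p.1, pvRowMul row p.2))
    (pvSums0 ops, pvProds0 ops)
  fin.1.values.sum + fin.2.values.sum

-- ===== PRECONDITION & SPEC =====
-- Pre_ excludes inputs where int() raises in an operator column, and ragged inputs where a value
-- row lacks an operator-column entry: there A's zip(*) truncation silently drops columns while B,
-- which indexes the value rows by the operator row, raises (IndexError resp. ValueError).
def Pre_part1 (data : String) : Prop :=
  ∀ r ∈ (pvRows data).dropLast, ∀ j : Nat,
    j < ((pvRows data).getLast?.getD []).length →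
    (((pvRows data).getLast?.getD []).getD j "" = "+" ∨
     ((pvRows data).getLast?.getD []).getD j "" = "*") →
    j < r.length ∧ (PySem.Int.ofStr? (r.getD j "")).isSome = true
instance (data : String) : Decidable (Pre_part1 data) := by unfold Pre_part1; infer_instance

def pvWitness_part1 : String := "1 2\n3 4\n+ *"

def Spec_part1 (data : String) (out : Int) : Prop := out = part1_alt data
instance (data : String) (out : Int) : Decidable (Spec_part1 data out) := by unfold Spec_part1; infer_instance

-- ===== CLAIM (what is proved, stated in full; the proofs are below) =====
def Claim_equal_part1 : Prop := ∀ (data : String), Dom_part1 data → Pre_part1 data → Spec_part1 data (part1 data)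

-- ===== LEMMAS AND PROOFS =====

-- canonical value both ports are reduced to: per-column contribution, summed over the columns
def pvNcols (rows : List (List String)) : Nat := ((rows.map List.length).min?).getD 0

def pvVals (rows : List (List String)) (j : Nat) : List String :=
  rows.dropLast.map (fun r => r.getD j "")

def pvContrib (rows : List (List String)) (j : Nat) : Int :=
  let op := (rows.getLast?.getD []).getD j ""
  if op = "+" then ((pvVals rows j).map pvInt).sum
  else if op = "*" then (pvVals rows j).foldl (fun prod x => prod * pvInt x) 1
  else 0

def pvCanon (rows : List (List String)) : Int :=
  ((List.range (pvNcols rows)).map (pvContrib rows)).sum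

def pvCanonFull (rows : List (List String)) : Int :=
  ((List.range ((rows.getLast?.getD []).length)).map (pvContrib rows)).sum

theorem pvNcols_pos_ne_nil (rows : List (List String)) (h : 0 < pvNcols rows) : rows ≠ [] := by
  intro hnil; rw [hnil] at h; simp [pvNcols] at h

theorem pvMin_eq_some (rows : List (List String)) (hne : rows ≠ []) :
    (rows.map List.length).min? = some (pvNcols rows) := by
  cases hm : (rows.map List.length).min? with
  | none => exact absurd (by simpa using List.min?_eq_none_iff.mp hm) hne
  | some m => simp [pvNcols, hm]

theorem pvNcols_le (rows : List (List String)) (r : List String) (hr : r ∈ rows) :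
    pvNcols rows ≤ r.length := by
  have hne : rows ≠ [] := by rintro rfl; simp at hr
  have := (List.min?_eq_some_iff.mp (pvMin_eq_some rows hne)).2
  exact this r.length (List.mem_map_of_mem hr)

theorem pvGetLast_getD (rows : List (List String)) (hne : rows ≠ []) :
    rows.getLast?.getD [] = rows.getLast hne := by
  rw [List.getLast?_eq_some_getLast hne]; rfl

-- A's column step equals the canonical contribution of column j
theorem pvColStep_eq (rows : List (List String)) (hne : rows ≠ []) (j : Nat) (t : Int) :
    pvColStep t (rows.map (fun r => r.getD j "")) = t + pvContrib rows j := by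
  have hmapne : rows.map (fun r => r.getD j "") ≠ [] := by simpa using hne
  have hop : PySem.List.pyGetD (rows.map (fun r => r.getD j "")) (-1) ""
      = (rows.getLast?.getD []).getD j "" := by
    rw [PySem.List.pyGetD_neg_one _ _ hmapne, pvGetLast_getD rows hne]
    rw [List.getLast_map]
  have hslice : PySem.List.slice (rows.map (fun r => r.getD j "")) none (some (-1))
      = pvVals rows j := by
    rw [PySem.List.slice_to_neg_one, pvVals, List.map_dropLast]
  unfold pvColStep pvContrib
  rw [hop, hslice]
  dsimp only
  split_ifs <;> simp

-- A's whole loop equals the canonical sum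
theorem partA_eq_canon (rows : List (List String)) :
    (pvZipStar rows).foldl pvColStep 0 = pvCanon rows := by
  unfold pvZipStar pvCanon
  rw [List.foldl_map]
  rw [show (((rows.map List.length).min?).getD 0) = pvNcols rows from rfl]
  rw [PySem.List.foldl_congr_mem (List.range (pvNcols rows))
      (fun t j => pvColStep t (rows.map (fun r => r.getD j "")))
      (fun t j => t + pvContrib rows j) 0
      (by
        intro t j hj
        have hne : rows ≠ [] := pvNcols_pos_ne_nil rows (by
          have := List.mem_range.mp hj; omega)
        exact pvColStep_eq rows hne j t)]
  rw [PySem.List.foldl_add (List.range (pvNcols rows)) (pvContrib rows) 0]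
  simp

theorem pvMemSplit (rows : List (List String)) (hne : rows ≠ []) (r : List String)
    (hr : r ∈ rows) : r ∈ rows.dropLast ∨ r = rows.getLast hne := by
  have hr' : r ∈ rows.dropLast ++ [rows.getLast hne] := by
    rw [List.dropLast_append_getLast hne]; exact hr
  rcases List.mem_append.mp hr' with h | h
  · exact Or.inl h
  · exact Or.inr (by simpa using h)

-- under Pre_'s length clause, columns between the zip-truncation bound and the operator-row
-- length carry no '+'/'*' operator, so the truncated and the full canonical sums agree
theorem canon_eq_canonFull (rows : List (List String))
    (H : ∀ r ∈ rows.dropLast, ∀ j : Nat, j < (rows.getLast?.getD []).length →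
      ((rows.getLast?.getD []).getD j "" = "+" ∨ (rows.getLast?.getD []).getD j "" = "*") →
      j < r.length) :
    pvCanon rows = pvCanonFull rows := by
  by_cases hne : rows = []
  · subst hne; rfl
  unfold pvCanon pvCanonFull
  have hlast_mem : rows.getLast?.getD [] ∈ rows := by
    rw [pvGetLast_getD rows hne]; exact List.getLast_mem hne
  have hmle : pvNcols rows ≤ (rows.getLast?.getD []).length := pvNcols_le rows _ hlast_mem
  set m := pvNcols rows with hm
  set n := (rows.getLast?.getD []).length with hn
  have hsplit : List.range n = List.range m ++ (List.range (n - m)).map (m + ·) := by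
    rw [← List.range_add, Nat.add_sub_cancel' hmle]
  rw [hsplit, List.map_append, List.sum_append]
  have hzero : ∀ i ∈ (List.range (n - m)).map (m + ·), pvContrib rows i = 0 := by
    intro i hi
    obtain ⟨k, hk, rfl⟩ := List.mem_map.mp hi
    have hkn : m + k < n := by have := List.mem_range.mp hk; omega
    unfold pvContrib
    dsimp only
    by_cases hplus : (rows.getLast?.getD []).getD (m + k) "" = "+"
    · exfalso
      have hall : ∀ r ∈ rows, m + k < r.length := by
        intro r hr
        rcases pvMemSplit rows hne r hr with h1 | h2
        · exact H r h1 (m + k) hkn (Or.inl hplus)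
        · rw [h2, ← pvGetLast_getD rows hne]; omega
      have : m + k < m := by
        have hmem := (List.min?_eq_some_iff.mp (pvMin_eq_some rows hne)).1
        obtain ⟨r, hr, hrlen⟩ := List.mem_map.mp hmem
        have := hall r hr; omega
      omega
    by_cases hmul : (rows.getLast?.getD []).getD (m + k) "" = "*"
    · exfalso
      have hall : ∀ r ∈ rows, m + k < r.length := by
        intro r hr
        rcases pvMemSplit rows hne r hr with h1 | h2
        · exact H r h1 (m + k) hkn (Or.inr hmul)
        · rw [h2, ← pvGetLast_getD rows hne]; omega
      have : m + k < m := by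
        have hmem := (List.min?_eq_some_iff.mp (pvMin_eq_some rows hne)).1
        obtain ⟨r, hr, hrlen⟩ := List.mem_map.mp hmem
        have := hall r hr; omega
      omega
    · rw [if_neg hplus, if_neg hmul]
  have hzero2 : ∀ x ∈ ((List.range (n - m)).map (m + ·)).map (pvContrib rows), x = 0 := by
    intro x hx
    obtain ⟨i, hi, rfl⟩ := List.mem_map.mp hx
    exact hzero i hi
  rw [List.sum_eq_zero hzero2, add_zero]

-- ---- B side ----

-- a fold whose step acts componentwise on a pair splits into two folds
theorem foldl_pair_split {α β γ : Type} (l : List α) (fA : α → β → β) (fB : α → γ → γ)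
    (a : β) (b : γ) :
    l.foldl (fun p x => (fA x p.1, fB x p.2)) (a, b)
      = (l.foldl (fun y x => fA x y) a, l.foldl (fun y x => fB x y) b) := by
  induction l generalizing a b with
  | nil => rfl
  | cons x t ih => simp only [List.foldl_cons]; exact ih (fA x a) (fB x b)

-- getD after a loop of modifies over a duplicate-free key list
theorem getD_foldl_modify_list (L : List Int) (hL : L.Nodup) (g : Int → Int → Int) (d0 : Int)
    (d : PySem.Dict Int Int) (k : Int) :
    (L.foldl (fun d j => d.modify j d0 (g j)) d).getD k d0
      = if k ∈ L then g k (d.getD k d0) else d.getD k d0 := by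
  induction L generalizing d with
  | nil => simp
  | cons j t ih =>
    have hjt : j ∉ t := (List.nodup_cons.mp hL).1
    have ht : t.Nodup := (List.nodup_cons.mp hL).2
    simp only [List.foldl_cons]
    rw [ih ht]
    by_cases hkj : k = j
    · subst hkj
      rw [if_neg hjt, if_pos (List.mem_cons_self), PySem.Dict.getD_modify, if_pos rfl]
    · rw [PySem.Dict.getD_modify, if_neg hkj]
      by_cases hkt : k ∈ t
      · rw [if_pos hkt, if_pos (List.mem_cons_of_mem _ hkt)]
      · rw [if_neg hkt, if_neg (by simp [hkj, hkt])]

theorem set_update_self (s : List Int) : PySem.Set.update s s = s := by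
  rw [PySem.Set.update_eq_append_filter]
  have : (PySem.Set.ofList s).filter (fun y => !PySem.Set.contains s y) = [] := by
    rw [List.filter_eq_nil_iff]
    intro y hy
    have hys : y ∈ s := by simpa [PySem.Set.mem_ofList] using hy
    simpa using hys
  rw [this, List.append_nil]

theorem keys_pvRowAdd (row : List String) (d : PySem.Dict Int Int) :
    (pvRowAdd row d).keys = d.keys := by
  unfold pvRowAdd
  rw [PySem.Dict.keys_foldl_modify d.keys 0
    (fun _ j => fun a => a + pvInt (PySem.List.pyGetD row j "")) d]
  exact set_update_self d.keys

theorem keys_pvRowMul (row : List String) (d : PySem.Dict Int Int) :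
    (pvRowMul row d).keys = d.keys := by
  unfold pvRowMul
  rw [PySem.Dict.keys_foldl_modify d.keys 1
    (fun _ j => fun a => a * pvInt (PySem.List.pyGetD row j "")) d]
  exact set_update_self d.keys

-- value of the sums dict after the whole row pass
theorem getD_rows_fold_add (rs : List (List String)) (d : PySem.Dict Int Int)
    (hnd : d.keys.Nodup) (k : Int) (hk : k ∈ d.keys) :
    (rs.foldl (fun d row => pvRowAdd row d) d).getD k 0
      = rs.foldl (fun a r => a + pvInt (PySem.List.pyGetD r k "")) (d.getD k 0) := by
  induction rs generalizing d with
  | nil => simp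
  | cons r t ih =>
    simp only [List.foldl_cons]
    rw [ih (pvRowAdd r d) (by rw [keys_pvRowAdd]; exact hnd) (by rw [keys_pvRowAdd]; exact hk)]
    congr 1
    unfold pvRowAdd
    rw [getD_foldl_modify_list d.keys hnd _ 0 d k, if_pos hk]

theorem getD_rows_fold_mul (rs : List (List String)) (d : PySem.Dict Int Int)
    (hnd : d.keys.Nodup) (k : Int) (hk : k ∈ d.keys) :
    (rs.foldl (fun d row => pvRowMul row d) d).getD k 1
      = rs.foldl (fun a r => a * pvInt (PySem.List.pyGetD r k "")) (d.getD k 1) := by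
  induction rs generalizing d with
  | nil => simp
  | cons r t ih =>
    simp only [List.foldl_cons]
    rw [ih (pvRowMul r d) (by rw [keys_pvRowMul]; exact hnd) (by rw [keys_pvRowMul]; exact hk)]
    congr 1
    unfold pvRowMul
    rw [getD_foldl_modify_list d.keys hnd _ 1 d k, if_pos hk]

-- the dict comprehensions: items, keys, nodup, initial values
theorem nodup_fst_filter_enumerate (ops : List String) (p : Int × String → Bool) :
    (((PySem.List.enumerate ops).filter p).map (·.1)).Nodup := by
  have h1 : ((PySem.List.enumerate ops).filter p).Pairwise (fun p q => p.1 < q.1) :=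
    (PySem.List.pairwise_lt_enumerate ops 0).filter p
  have h2 : (((PySem.List.enumerate ops).filter p).map (·.1)).Pairwise (· < ·) :=
    List.pairwise_map.mpr h1
  exact h2.imp Int.ne_of_lt

theorem items_dict0 (ops : List String) (p : Int × String → Bool) (c : Int) :
    ((((PySem.List.enumerate ops).filter p).foldl (fun d q => d.insert q.1 c)
        PySem.Dict.empty) : PySem.Dict Int Int).items
      = ((PySem.List.enumerate ops).filter p).map (fun q => (q.1, c)) := by
  have := PySem.Dict.items_foldl_insert_fresh ((PySem.List.enumerate ops).filter p)
    (fun q : Int × String => q.1) (fun _ => c) PySem.Dict.empty (by intro a _; simp)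
    (nodup_fst_filter_enumerate ops p)
  simpa using this

theorem keys_dict0 (ops : List String) (p : Int × String → Bool) (c : Int) :
    ((((PySem.List.enumerate ops).filter p).foldl (fun d q => d.insert q.1 c)
        PySem.Dict.empty) : PySem.Dict Int Int).keys
      = ((PySem.List.enumerate ops).filter p).map (·.1) := by
  simp only [PySem.Dict.keys, items_dict0]
  rw [List.map_map]
  rfl

theorem getD_dict0 (ops : List String) (p : Int × String → Bool) (c : Int) (k : Int)
    (hk : k ∈ ((PySem.List.enumerate ops).filter p).map (·.1)) :
    ((((PySem.List.enumerate ops).filter p).foldl (fun d q => d.insert q.1 c)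
        PySem.Dict.empty) : PySem.Dict Int Int).getD k c = c := by
  obtain ⟨q, hq, rfl⟩ := List.mem_map.mp hk
  apply PySem.Dict.getD_of_mem_items
  · rw [items_dict0]; exact List.mem_map.mpr ⟨q, hq, rfl⟩
  · rw [keys_dict0]; exact nodup_fst_filter_enumerate ops p

theorem keys_rows_fold_add (rs : List (List String)) (d : PySem.Dict Int Int) :
    (rs.foldl (fun d row => pvRowAdd row d) d).keys = d.keys := by
  induction rs generalizing d with
  | nil => rfl
  | cons r t ih => simp only [List.foldl_cons]; rw [ih, keys_pvRowAdd]

theorem keys_rows_fold_mul (rs : List (List String)) (d : PySem.Dict Int Int) :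
    (rs.foldl (fun d row => pvRowMul row d) d).keys = d.keys := by
  induction rs generalizing d with
  | nil => rfl
  | cons r t ih => simp only [List.foldl_cons]; rw [ih, keys_pvRowMul]

-- sum over the '+'-dict plus sum over the '*'-dict is one sum over the whole operator row
theorem sum_split_ops (l : List (Int × String)) (S P : Int → Int) :
    ((l.filter (fun p => p.2 == "+")).map (S ∘ (·.1))).sum
      + ((l.filter (fun p => p.2 == "*")).map (P ∘ (·.1))).sum
      = (l.map (fun p => if p.2 = "+" then S p.1
                         else if p.2 = "*" then P p.1 else 0)).sum := by
  induction l with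
  | nil => simp
  | cons x t ih =>
    by_cases h1 : x.2 = "+"
    · simp [h1, Function.comp, ← ih]
      ring
    · by_cases h2 : x.2 = "*"
      · simp [h2, Function.comp, ← ih]
        ring
      · simp [h1, h2, ← ih]

-- B's whole body equals the canonical sum over the full operator row
theorem partB_eq_canonFull (data : String) :
    part1_alt data = pvCanonFull (pvRows data) := by
  unfold part1_alt pvSums0 pvProds0
  set rows := pvRows data with hrows
  set ops := rows.getLast?.getD [] with hops
  set ladd := (PySem.List.enumerate ops).filter (fun p => p.2 == "+") with hladd
  set lmul := (PySem.List.enumerate ops).filter (fun p => p.2 == "*") with hlmul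
  set sums0 : PySem.Dict Int Int := ladd.foldl (fun d p => d.insert p.1 0) PySem.Dict.empty
  set prods0 : PySem.Dict Int Int := lmul.foldl (fun d p => d.insert p.1 1) PySem.Dict.empty
  dsimp only
  rw [foldl_pair_split rows.dropLast pvRowAdd pvRowMul sums0 prods0]
  dsimp only
  have hka : sums0.keys = ladd.map (·.1) := keys_dict0 ops _ 0
  have hkm : prods0.keys = lmul.map (·.1) := keys_dict0 ops _ 1
  have hnda : sums0.keys.Nodup := by rw [hka]; exact nodup_fst_filter_enumerate ops _
  have hndm : prods0.keys.Nodup := by rw [hkm]; exact nodup_fst_filter_enumerate ops _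
  have hva : (rows.dropLast.foldl (fun y x => pvRowAdd x y) sums0).values
      = sums0.keys.map (fun k =>
          rows.dropLast.foldl (fun a r => a + pvInt (PySem.List.pyGetD r k "")) 0) := by
    rw [PySem.Dict.values_eq_map_keys _ (by rw [keys_rows_fold_add]; exact hnda) 0,
        keys_rows_fold_add]
    apply List.map_congr_left
    intro k hk
    rw [getD_rows_fold_add rows.dropLast sums0 hnda k hk,
        getD_dict0 ops _ 0 k (by rw [← hka]; exact hk)]
  have hvm : (rows.dropLast.foldl (fun y x => pvRowMul x y) prods0).values
      = prods0.keys.map (fun k =>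
          rows.dropLast.foldl (fun a r => a * pvInt (PySem.List.pyGetD r k "")) 1) := by
    rw [PySem.Dict.values_eq_map_keys _ (by rw [keys_rows_fold_mul]; exact hndm) 1,
        keys_rows_fold_mul]
    apply List.map_congr_left
    intro k hk
    rw [getD_rows_fold_mul rows.dropLast prods0 hndm k hk,
        getD_dict0 ops _ 1 k (by rw [← hkm]; exact hk)]
  rw [hva, hvm, hka, hkm, List.map_map, List.map_map]
  rw [sum_split_ops (PySem.List.enumerate ops)
    (fun k => rows.dropLast.foldl (fun a r => a + pvInt (PySem.List.pyGetD r k "")) 0)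
    (fun k => rows.dropLast.foldl (fun a r => a * pvInt (PySem.List.pyGetD r k "")) 1)]
  rw [PySem.List.enumerate_eq_map_pyRange ops ""]
  rw [show PySem.List.len ops = (ops.length : Int) from rfl,
      PySem.List.pyRange_zero_natCast, List.map_map, List.map_map]
  unfold pvCanonFull
  rw [← hops]
  apply congrArg List.sum
  apply List.map_congr_left
  intro j hj
  simp only [Function.comp, PySem.List.pyGetD_natCast]
  unfold pvContrib
  dsimp only
  by_cases hplus : ops.getD j "" = "+"
  · rw [if_pos hplus, if_pos hplus,
        PySem.List.foldl_add rows.dropLast (fun r => pvInt (r.getD j "")) 0]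
    rw [zero_add, pvVals, List.map_map]
    simp [Function.comp_def]
  · rw [if_neg hplus, if_neg hplus]
    by_cases hmul : ops.getD j "" = "*"
    · rw [if_pos hmul, if_pos hmul, pvVals, List.foldl_map]
    · rw [if_neg hmul, if_neg hmul]

-- ===== VERDICT (by name: the statement is the Claim_ definition above) =====
theorem part1_spec : Claim_equal_part1 := by
  intro data _ hpre
  unfold Spec_part1 part1
  rw [PySem.List.foldl_pyRange_zero_pyGetD' (pvZipStar (pvRows data)) [] pvColStep 0]
  rw [partA_eq_canon, partB_eq_canonFull]
  exact canon_eq_canonFull (pvRows data)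
    (fun r hr j hj hop => (hpre r hr j hj hop).1)
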